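-- pv_equiv track=rewrite | github.com/sravanneeli/Data-Structures-Algorithms | Interviewbit_Questions/Arrays/min_lights_activate.py | min_lights
-- ===== SOURCE A (Python) =====
-- def min_lights(A, b):
--     n = len(A)
--     if b == 0:
--         return -1
--     i = 0
--     bulbs = 0
--     while i < n:
--         pos = -1
--         for j in range(max(0, i - b + 1), min(i + b, n)):
--             if A[j] == 1:
--                 pos = j
--
--         if pos == -1:
--             return -1
--         bulbs += 1
--         i = pos + b
--
--     return bulbs
-- ===== SOURCE B (Python) =====
-- def min_lights(A, b):
--     if b == 0:
--         return -1
--     n = len(A)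
--     lit = [j for j, v in enumerate(A) if v == 1]
--     bulbs = 0
--     i = 0
--     k = 0  # pointer into lit, only moves forward across the whole run
--     while i < n:
--         best = -1
--         while k < len(lit) and lit[k] <= i + b - 1:
--             best = lit[k]
--             k += 1
--         if best < max(0, i - b + 1):
--             return -1
--         bulbs += 1
--         i = best + b
--     return bulbs
-- ===== Notes on version B (the rewrite author's own statement) =====
-- stated objective: alternative
-- what changed: B extracts the sorted list of lit positions once and runs the greedy with a forward-only pointer into that list (two-pointer, O(1) amortized per step), instead of A's per-step rescan of the whole 2b-wide window.
import Mathlib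
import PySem

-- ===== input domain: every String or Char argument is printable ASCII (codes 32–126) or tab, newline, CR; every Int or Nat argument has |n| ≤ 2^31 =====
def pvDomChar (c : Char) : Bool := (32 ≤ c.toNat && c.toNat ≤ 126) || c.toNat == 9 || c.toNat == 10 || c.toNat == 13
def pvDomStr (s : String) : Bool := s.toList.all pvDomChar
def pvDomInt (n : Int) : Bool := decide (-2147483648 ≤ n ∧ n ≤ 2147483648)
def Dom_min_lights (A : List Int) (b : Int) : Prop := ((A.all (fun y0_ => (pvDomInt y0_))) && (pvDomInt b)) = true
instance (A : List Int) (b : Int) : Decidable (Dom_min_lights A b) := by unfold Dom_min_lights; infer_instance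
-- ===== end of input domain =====

-- B replaces A's per-step window rescan by one pass extracting the lit positions and a forward-only
-- pointer into that sorted list (two-pointer greedy); objective: alternative (same result, different mechanism).

-- ===== PORT A =====
-- inner 'for j in range(max(0,i-b+1), min(i+b,n)): if A[j]==1: pos=j' (indices always in range, so pyGetD is exact)
def scanA (A : List Int) (lo hi : Int) : Int :=
  (PySem.List.pyRange lo hi 1).foldl (fun pos j => if PySem.List.pyGetD A j 0 = 1 then j else pos) (-1)

-- the while-loop; fuel A.length+1 bounds the iteration count (i strictly increases and the loop runs only while i < n)
def loopA (A : List Int) (b n : Int) : Nat → Int → Int → Int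
  | 0, _, _ => -1
  | fuel+1, i, bulbs =>
    if i < n then
      let pos := scanA A (max 0 (i - b + 1)) (min (i + b) n)
      if pos = -1 then -1
      else loopA A b n fuel (pos + b) (bulbs + 1)
    else bulbs

def min_lights (A : List Int) (b : Int) : Int :=
  if b = 0 then -1 else loopA A b (A.length : Int) (A.length + 1) 0 0

-- ===== PORT B =====
-- 'lit = [j for j, v in enumerate(A) if v == 1]'
def litB (A : List Int) : List Int :=
  (PySem.List.enumerate A 0).foldl (fun acc p => if p.2 = 1 then acc ++ [p.1] else acc) []

-- inner 'while k < len(lit) and lit[k] <= i + b - 1: best = lit[k]; k += 1' (hi = i + b - 1)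
def innerB (lit : List Int) (hi : Int) (k : Nat) (best : Int) : Int × Nat :=
  if h : k < lit.length then
    if lit[k] ≤ hi then innerB lit hi (k+1) lit[k] else (best, k)
  else (best, k)
termination_by lit.length - k

-- B's outer while-loop; same fuel bound as loopA
def loopB (lit : List Int) (b n : Int) : Nat → Int → Nat → Int → Int
  | 0, _, _, _ => -1
  | fuel+1, i, k, bulbs =>
    if i < n then
      let r := innerB lit (i + b - 1) k (-1)
      if r.1 < max 0 (i - b + 1) then -1
      else loopB lit b n fuel (r.1 + b) r.2 (bulbs + 1)
    else bulbs

def min_lights_alt (A : List Int) (b : Int) : Int :=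
  if b = 0 then -1 else loopB (litB A) b (A.length : Int) (A.length + 1) 0 0 0

-- ===== PRECONDITION & SPEC =====
def Spec_min_lights (A : List Int) (b : Int) (out : Int) : Prop := out = min_lights_alt A b
instance (A : List Int) (b : Int) (out : Int) : Decidable (Spec_min_lights A b out) := by unfold Spec_min_lights; infer_instance

-- ===== CLAIM (what is proved, stated in full; the proofs are below) =====
def Claim_equal_min_lights : Prop := ∀ (A : List Int) (b : Int), Dom_min_lights A b → Spec_min_lights A b (min_lights A b)

-- ===== LEMMAS AND PROOFS =====

-- spec of A's inner scan: rightmost index j < h with A[j] = 1, else -1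
def preScan (A : List Int) (h : Nat) : Int :=
  (List.range h).foldl (fun pos j => if A.getD j 0 = 1 then (j : Int) else pos) (-1)

theorem preScan_succ (A : List Int) (h : Nat) :
    preScan A (h+1) = if A.getD h 0 = 1 then (h : Int) else preScan A h := by
  simp [preScan, List.range_succ]

theorem preScan_bounds (A : List Int) (h : Nat) :
    -1 ≤ preScan A h ∧ preScan A h < (h : Int) := by
  induction h with
  | zero => simp [preScan]
  | succ h ih =>
    rw [preScan_succ]
    split_ifs <;> push_cast <;> omega

theorem scanA_eq (A : List Int) (h : Nat) (lo : Int) (hlo : 0 ≤ lo) :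
    scanA A lo (h : Int) = if lo ≤ preScan A h then preScan A h else -1 := by
  induction h with
  | zero =>
    have h0 : preScan A 0 = -1 := by simp [preScan]
    have hn : PySem.List.pyRange lo ((0:Nat):Int) 1 = [] :=
      PySem.List.pyRange_one_eq_nil (by push_cast; omega)
    rw [h0]
    simp only [scanA, hn, List.foldl_nil]
    have : ¬ lo ≤ (-1 : Int) := by omega
    simp [this]
  | succ h ih =>
    by_cases hle : lo ≤ (h : Int)
    · have hcast : ((h+1 : Nat) : Int) = (h : Int) + 1 := by push_cast; ring
      rw [hcast]
      unfold scanA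
      rw [PySem.List.pyRange_one_succ_right hle, List.foldl_append]
      simp only [List.foldl_cons, List.foldl_nil, PySem.List.pyGetD_natCast]
      have hs : (PySem.List.pyRange lo (h : Int) 1).foldl
          (fun pos j => if PySem.List.pyGetD A j 0 = 1 then j else pos) (-1) = scanA A lo h := rfl
      rw [hs, ih, preScan_succ]
      split_ifs <;> omega
    · have hempty : PySem.List.pyRange lo ((h+1 : Nat) : Int) 1 = [] :=
        PySem.List.pyRange_one_eq_nil (by push_cast; omega)
      have hb := preScan_bounds A (h+1)
      rw [scanA, hempty]
      simp only [List.foldl_nil]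
      have : ¬ lo ≤ preScan A (h+1) := by push_cast at hb ⊢; omega
      simp [this]

theorem preScan_mem (A : List Int) (h : Nat) :
    preScan A h = -1 ∨ (0 ≤ preScan A h ∧ A.getD (preScan A h).toNat 0 = 1) := by
  induction h with
  | zero => left; simp [preScan]
  | succ h ih =>
    rw [preScan_succ]
    by_cases hA : A.getD h 0 = 1
    · right
      rw [if_pos hA]
      exact ⟨by positivity, by simpa using hA⟩
    · rw [if_neg hA]; exact ih

theorem preScan_max (A : List Int) (h : Nat) :
    ∀ (j : Nat), j < h → A.getD j 0 = 1 → (j : Int) ≤ preScan A h := by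
  induction h with
  | zero => intro j hj _; omega
  | succ h ih =>
    intro j hj hA
    rw [preScan_succ]
    by_cases hjh : j = h
    · subst hjh
      rw [if_pos hA]
    · have := ih j (by omega) hA
      have hb := (preScan_bounds A h).2
      split_ifs <;> omega

theorem getD_one_lt (A : List Int) (j : Nat) (h : A.getD j 0 = 1) : j < A.length := by
  by_contra hn
  rw [List.getD_eq_default _ _ (by omega)] at h
  exact absurd h (by norm_num)

-- spec of B's comprehension: the lit positions in increasing order, recursively
def litR (s : Int) : List Int → List Int
  | [] => []
  | v :: xs => if v = 1 then s :: litR (s+1) xs else litR (s+1) xs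

theorem lit_fold (xs : List Int) : ∀ (s : Int) (acc : List Int),
    (PySem.List.enumerate xs s).foldl (fun acc p => if p.2 = 1 then acc ++ [p.1] else acc) acc
      = acc ++ litR s xs := by
  induction xs with
  | nil => intro s acc; simp [litR, PySem.List.enumerate_nil]
  | cons v xs ih =>
    intro s acc
    rw [PySem.List.enumerate_cons, List.foldl_cons]
    simp only
    rw [ih]
    by_cases hv : v = 1 <;> simp [litR, hv]

theorem litB_eq (A : List Int) : litB A = litR 0 A := by
  have := lit_fold A 0 []
  simpa [litB] using this

theorem litR_mem : ∀ (xs : List Int) (s x : Int),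
    x ∈ litR s xs ↔ ∃ j : Nat, j < xs.length ∧ xs.getD j 0 = 1 ∧ x = s + j := by
  intro xs
  induction xs with
  | nil => intro s x; simp [litR]
  | cons v xs ih =>
    intro s x
    constructor
    · intro hx
      by_cases hv : v = 1
      · rw [litR, if_pos hv] at hx
        rcases List.mem_cons.1 hx with rfl | hx
        · exact ⟨0, by simp, by simpa using hv, by simp⟩
        · obtain ⟨j, hj, hA, rfl⟩ := (ih (s+1) _).1 hx
          exact ⟨j+1, by simpa using hj, by simpa using hA, by push_cast; ring⟩
      · rw [litR, if_neg hv] at hx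
        obtain ⟨j, hj, hA, rfl⟩ := (ih (s+1) _).1 hx
        exact ⟨j+1, by simpa using hj, by simpa using hA, by push_cast; ring⟩
    · rintro ⟨j, hj, hA, rfl⟩
      cases j with
      | zero =>
        have hv : v = 1 := by simpa using hA
        rw [litR, if_pos hv]
        simp
      | succ j =>
        have hx : s + 1 + (j : Int) ∈ litR (s+1) xs :=
          (ih (s+1) _).2 ⟨j, by simpa using hj, by simpa using hA, rfl⟩
        have harr : s + ((j+1 : Nat) : Int) = s + 1 + (j : Int) := by push_cast; ring
        rw [harr]
        by_cases hv : v = 1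
        · rw [litR, if_pos hv]; exact List.mem_cons_of_mem _ hx
        · rw [litR, if_neg hv]; exact hx

theorem litR_lb : ∀ (xs : List Int) (s x : Int), x ∈ litR s xs → s ≤ x := by
  intro xs s x hx
  obtain ⟨j, _, _, rfl⟩ := (litR_mem xs s x).1 hx
  omega

theorem litR_pairwise : ∀ (xs : List Int) (s : Int), (litR s xs).Pairwise (· < ·) := by
  intro xs
  induction xs with
  | nil => intro s; simp [litR]
  | cons v xs ih =>
    intro s
    by_cases hv : v = 1
    · rw [litR, if_pos hv]
      exact List.pairwise_cons.2 ⟨fun x hx => by have := litR_lb xs (s+1) x hx; omega, ih (s+1)⟩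
    · rw [litR, if_neg hv]; exact ih (s+1)

theorem litR_mem_prop (A : List Int) (x : Int) (hx : x ∈ litR 0 A) :
    0 ≤ x ∧ x < (A.length : Int) ∧ A.getD x.toNat 0 = 1 := by
  obtain ⟨j, hj, hA, rfl⟩ := (litR_mem A 0 x).1 hx
  refine ⟨by omega, by omega, ?_⟩
  simpa using hA

theorem litR_mem_of (A : List Int) (j : Nat) (hj : A.getD j 0 = 1) :
    (j : Int) ∈ litR 0 A :=
  (litR_mem A 0 _).2 ⟨j, getD_one_lt A j hj, hj, by simp⟩

theorem innerB_spec (lit : List Int) (hi : Int) (hsort : lit.Pairwise (· < ·)) :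
    ∀ (fuel k : Nat) (best : Int), lit.length - k ≤ fuel → k ≤ lit.length →
      ((innerB lit hi k best).1 = best ∨
        ((innerB lit hi k best).1 ∈ lit.drop k ∧ (innerB lit hi k best).1 ≤ hi))
      ∧ (∀ x ∈ lit.drop k, x ≤ hi → x ≤ (innerB lit hi k best).1)
      ∧ k ≤ (innerB lit hi k best).2 ∧ (innerB lit hi k best).2 ≤ lit.length
      ∧ (∀ x ∈ lit.take (innerB lit hi k best).2, x ∈ lit.take k ∨ x ≤ (innerB lit hi k best).1) := by
  intro fuel
  induction fuel with
  | zero =>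
    intro k best hf hklen
    rw [innerB, dif_neg (by omega : ¬ k < lit.length)]
    refine ⟨Or.inl rfl, ?_, le_rfl, hklen, fun x hx => Or.inl hx⟩
    intro x hx
    rw [List.drop_eq_nil_of_le (by omega)] at hx
    exact absurd hx List.not_mem_nil
  | succ fuel ih =>
    intro k best hf hklen
    rw [innerB]
    by_cases hk : k < lit.length
    · have hdrop : lit.drop k = lit[k] :: lit.drop (k+1) := (List.getElem_cons_drop hk).symm
      have hlt : ∀ x ∈ lit.drop (k+1), lit[k] < x := by
        have hp : (lit.drop k).Pairwise (· < ·) := hsort.sublist (List.drop_sublist k lit)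
        rw [hdrop] at hp
        exact (List.pairwise_cons.1 hp).1
      by_cases hle : lit[k] ≤ hi
      · rw [dif_pos hk, if_pos hle]
        obtain ⟨h1, h2, h3, h4, h5⟩ := ih (k+1) lit[k] (by omega) (by omega)
        have hkle : lit[k] ≤ (innerB lit hi (k+1) lit[k]).1 := by
          rcases h1 with h1 | ⟨hm, _⟩
          · rw [h1]
          · exact le_of_lt (hlt _ hm)
        have hmem : (innerB lit hi (k+1) lit[k]).1 ∈ lit.drop k ∧
            (innerB lit hi (k+1) lit[k]).1 ≤ hi := by
          rcases h1 with h1 | ⟨hm, hh⟩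
          · refine ⟨?_, ?_⟩
            · rw [h1, hdrop]; exact List.mem_cons_self
            · rw [h1]; exact hle
          · refine ⟨?_, hh⟩
            rw [hdrop]
            exact List.mem_cons_of_mem _ hm
        refine ⟨Or.inr hmem, ?_, by omega, h4, ?_⟩
        · intro x hx hxle
          rw [hdrop] at hx
          rcases List.mem_cons.1 hx with rfl | hx
          · exact hkle
          · exact h2 x hx hxle
        · intro x hx
          rcases h5 x hx with hx' | hx'
          · rw [List.take_add_one, List.getElem?_eq_getElem hk] at hx'
            rcases List.mem_append.1 hx' with hx'' | hx''
            · exact Or.inl hx''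
            · simp only [Option.toList_some, List.mem_singleton] at hx''
              exact Or.inr (by rw [hx'']; exact hkle)
          · exact Or.inr hx'
      · rw [dif_pos hk, if_neg hle]
        refine ⟨Or.inl rfl, ?_, le_rfl, hklen, fun x hx => Or.inl hx⟩
        intro x hx hxle
        rw [hdrop] at hx
        rcases List.mem_cons.1 hx with rfl | hx
        · exact absurd hxle hle
        · exact absurd hxle (by have := hlt _ hx; omega)
    · rw [dif_neg hk]
      refine ⟨Or.inl rfl, ?_, le_rfl, hklen, fun x hx => Or.inl hx⟩
      intro x hx
      rw [List.drop_eq_nil_of_le (by omega)] at hx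
      exact absurd hx List.not_mem_nil

theorem loop_eq (A : List Int) (b : Int) : ∀ (fuel : Nat) (i bulbs : Int) (k : Nat),
    0 ≤ i → k ≤ ((litR 0 A)).length →
    (∀ x ∈ ((litR 0 A)).take k, x < max 0 (i - b + 1)) →
    loopA A b (A.length : Int) fuel i bulbs = loopB ((litR 0 A)) b (A.length : Int) fuel i k bulbs := by
  intro fuel
  induction fuel with
  | zero => intro i bulbs k _ _ _; rfl
  | succ fuel ih =>
    intro i bulbs k hi0 hk htake
    simp only [loopA, loopB]
    by_cases hin : i < (A.length : Int)
    · simp only [if_pos hin]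
      set lo := max 0 (i - b + 1) with hlo
      have hlo0 : (0:Int) ≤ lo := le_max_left _ _
      set top := min (i + b) (A.length : Int) with htop
      set P := preScan A top.toNat with hP
      obtain ⟨hr1, hr2, hr3, hr4, hr5⟩ :=
        innerB_spec ((litR 0 A)) (i + b - 1) (litR_pairwise A 0) (((litR 0 A)).length - k) k (-1) le_rfl hk
      set r := innerB ((litR 0 A)) (i + b - 1) k (-1) with hr
      -- r.1 is -1 or a lit position ≤ P
      have hr1P : r.1 = -1 ∨ (0 ≤ r.1 ∧ r.1 ≤ P) := by
        rcases hr1 with h | ⟨hm, hh⟩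
        · exact Or.inl h
        · right
          have hm' := litR_mem_prop A r.1 (List.mem_of_mem_drop hm)
          have hlt : r.1 < top := by omega
          have htop0 : 0 < top := by omega
          have hcast : ((top.toNat : Nat) : Int) = top := Int.toNat_of_nonneg (by omega)
          have := preScan_max A top.toNat r.1.toNat (by omega)
            (by rw [show r.1.toNat = r.1.toNat from rfl]; exact_mod_cast hm'.2.2)
          refine ⟨hm'.1, ?_⟩
          have h2 : (r.1.toNat : Int) = r.1 := Int.toNat_of_nonneg hm'.1
          rw [h2] at this
          exact this
      -- A's scan result
      have hAeq : scanA A lo top = if lo ≤ P then P else -1 := by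
        by_cases htop0 : 0 < top
        · have hmn : top = ((top.toNat : Nat) : Int) := (Int.toNat_of_nonneg (by omega)).symm
          rw [hmn]; exact scanA_eq A _ _ hlo0
        · have hA : scanA A lo top = -1 := by
            unfold scanA
            rw [PySem.List.pyRange_one_eq_nil (by omega)]
            rfl
          have htn : top.toNat = 0 := by omega
          have : P = -1 := by rw [hP, htn]; simp [preScan]
          rw [hA, this]
          rw [if_neg (by omega)]
      by_cases hPlo : lo ≤ P
      · -- both pick the same bulb P
        have hP0 : (0:Int) ≤ P := le_trans hlo0 hPlo
        have hPb := preScan_bounds A top.toNat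
        have hPm := preScan_mem A top.toNat
        rcases hPm with hPm | ⟨_, hPget⟩
        · omega
        · have hPlen : P.toNat < A.length := getD_one_lt A P.toNat hPget
          have hPmem : P ∈ (litR 0 A) := by
            have := litR_mem_of A P.toNat hPget
            rwa [Int.toNat_of_nonneg hP0] at this
          have hPdrop : P ∈ ((litR 0 A)).drop k := by
            rcases List.mem_append.1 ((List.take_append_drop k ((litR 0 A))) ▸ hPmem) with h | h
            · exact absurd (htake P h) (by omega)
            · exact h
          have htop0 : 0 < top := by
            by_contra hc
            have htn : top.toNat = 0 := by omega
            rw [hP, htn] at hP0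
            simp [preScan] at hP0
          have hcast : ((top.toNat : Nat) : Int) = top := Int.toNat_of_nonneg (by omega)
          have hPhi : P ≤ i + b - 1 := by
            have : P < ((top.toNat : Nat) : Int) := hPb.2
            rw [hcast] at this
            omega
          have hPr : P ≤ r.1 := hr2 P hPdrop hPhi
          have hrP : r.1 = P := by rcases hr1P with h | h <;> omega
          have hb1 : (1:Int) ≤ b := by omega
          rw [hAeq, if_pos hPlo, if_neg (show ¬ P = -1 by omega), if_neg (show ¬ r.1 < lo by omega), hrP]
          apply ih
          · omega
          · exact hr4
          · intro x hx
            rcases hr5 x hx with h | h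
            · have := htake x h; omega
            · rw [hrP] at h; omega
      · -- no bulb in the window: both return -1
        have hrlo : r.1 < lo := by rcases hr1P with h | h <;> omega
        rw [hAeq, if_neg hPlo, if_pos rfl, if_pos hrlo]
    · simp [hin]

-- ===== VERDICT (by name: the statement is the Claim_ definition above) =====
theorem min_lights_spec : Claim_equal_min_lights := by
  intro A b _
  unfold Spec_min_lights min_lights min_lights_alt
  by_cases hb : b = 0
  · simp [hb]
  · rw [if_neg hb, if_neg hb, litB_eq]
    exact loop_eq A b _ 0 0 0 le_rfl (by simp) (by simp)
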